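-- pv_equiv track=rewrite | github.com/joqjoq966/Algorithm_python | Codeforces/Round #692/B.py | fair
-- ===== SOURCE A (Python) =====
-- def fair(n):
-- 	m = n
-- 	while(m):
-- 		y = m%10
-- 		if y!=0 and n%y!=0:
-- 			return False
-- 		m//=10
-- 	return True
-- ===== SOURCE B (Python) =====
-- def fair(n):
--     # Accumulate the LCM of the nonzero digits, then do a single divisibility check.
--     m = n
--     l = 1
--     while m:
--         y = m % 10
--         if y:
--             a, b = l, y
--             while b:
--                 a, b = b, a % b
--             l = l * y // a
--         m //= 10
--     return n % l == 0
-- ===== Notes on version B (the rewrite author's own statement) =====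
-- stated objective: alternative
-- what changed: B folds the nonzero digits into a running LCM (hand-rolled Euclid gcd) and performs a single final n % lcm == 0 check, instead of A's per-digit divisibility test with early return.
-- outside the precondition, e.g. on fair(-13): A returns False, B does not finish within the time limit
import Mathlib
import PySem

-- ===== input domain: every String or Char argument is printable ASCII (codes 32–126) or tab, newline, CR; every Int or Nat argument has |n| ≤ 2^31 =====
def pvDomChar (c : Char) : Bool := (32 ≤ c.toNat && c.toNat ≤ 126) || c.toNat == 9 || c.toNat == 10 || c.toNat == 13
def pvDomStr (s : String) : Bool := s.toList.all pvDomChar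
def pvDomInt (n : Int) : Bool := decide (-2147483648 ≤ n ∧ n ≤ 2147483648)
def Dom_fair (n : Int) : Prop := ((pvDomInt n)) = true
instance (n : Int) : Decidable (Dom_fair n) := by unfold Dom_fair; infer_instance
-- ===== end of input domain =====

-- B replaces A's per-digit divisibility test (early return) with a running LCM of the
-- nonzero digits followed by a single final modulo check (objective: alternative).


-- ===== PORT A =====
-- Python's while loop, step for step, with Python // and % (PySem.Int.floordiv/mod);
-- fuel |n|+1 bounds the iteration count of every terminating run (on 0 ≤ n the loop
-- runs at most |n|+1 times; for n < 0 it reaches -1 and, when no digit test fails,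
-- Python diverges — exactly the runs that would exhaust the fuel).
def fairALoop (n m : Int) (fuel : Nat) : Bool :=
  match fuel with
  | 0 => true  -- unreachable on any terminating Python run with fuel |n|+1
  | fuel + 1 =>
    if m = 0 then true
    else  -- y := m % 10, inlined
      if PySem.Int.mod m 10 ≠ 0 ∧ PySem.Int.mod n (PySem.Int.mod m 10) ≠ 0 then false
      else fairALoop n (PySem.Int.floordiv m 10) fuel

def fair (n : Int) : Bool := fairALoop n n (n.natAbs + 1)

-- ===== PORT B =====
-- hand-rolled Euclid gcd loop, as in Source B
def gcdLoop (a b : Nat) : Nat :=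
  if b = 0 then a else gcdLoop b (a % b)
termination_by b
decreasing_by exact Nat.mod_lt _ (Nat.pos_of_ne_zero (by assumption))

def fairBLoop (m l : Nat) : Nat :=
  if m = 0 then l
  else  -- y := m % 10, inlined
    fairBLoop (m / 10) (if m % 10 ≠ 0 then l * (m % 10) / gcdLoop l (m % 10) else l)
termination_by m
decreasing_by exact Nat.div_lt_self (Nat.pos_of_ne_zero (by assumption)) (by norm_num)

def fair_alt (n : Int) : Bool := decide (n % ((fairBLoop n.toNat 1 : Nat) : Int) = 0)

-- ===== PRECONDITION & SPEC =====
-- Pre_ excludes n < 0, outside the function's natural domain: there B's loop always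
-- diverges (m //= 10 stalls at -1 with digit 9), while A's returning at all is an
-- accident of an early failing digit test (A too diverges e.g. on n = -9).
def Pre_fair (n : Int) : Prop := 0 ≤ n
instance (n : Int) : Decidable (Pre_fair n) := by unfold Pre_fair; infer_instance
def pvWitness_fair : Int := 12

def Spec_fair (n : Int) (out : Bool) : Prop := out = fair_alt n
instance (n : Int) (out : Bool) : Decidable (Spec_fair n out) := by unfold Spec_fair; infer_instance

-- ===== CLAIM (what is proved, stated in full; the proofs are below) =====
def Claim_equal_fair : Prop := ∀ (n : Int), Dom_fair n → Pre_fair n → Spec_fair n (fair n)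

-- ===== LEMMAS AND PROOFS =====

-- proof helper: A's loop specialised to m ≥ 0, as a structural recursion on a Nat
def fairAN (n : Int) (m : Nat) : Bool :=
  if m = 0 then true
  else
    if m % 10 ≠ 0 ∧ n % ((m % 10 : Nat) : Int) ≠ 0 then false
    else fairAN n (m / 10)
termination_by m
decreasing_by exact Nat.div_lt_self (Nat.pos_of_ne_zero (by assumption)) (by norm_num)

-- with enough fuel, the fueled Int loop agrees with the Nat loop on m ≥ 0
theorem fairALoop_eq_fairAN (n : Int) :
    ∀ (fuel : Nat) (m : Nat), m < fuel → fairALoop n (m : Int) fuel = fairAN n m := by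
  intro fuel
  induction fuel with
  | zero => intro m hm; omega
  | succ f ihf =>
    intro m hm
    by_cases h0 : m = 0
    · simp [fairALoop, fairAN, h0]
    · have hcast : PySem.Int.mod (m : Int) 10 = ((m % 10 : Nat) : Int) := by
        exact_mod_cast PySem.Int.mod_natCast m 10
      have hdiv : PySem.Int.floordiv (m : Int) 10 = ((m / 10 : Nat) : Int) := by
        exact_mod_cast PySem.Int.floordiv_natCast m 10
      have hlt : m / 10 < f := by
        have := Nat.div_lt_self (Nat.pos_of_ne_zero h0) (show 1 < 10 by norm_num)
        omega
      rw [fairALoop, fairAN]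
      simp only [Int.natCast_eq_zero, h0, if_false, hcast, hdiv]
      by_cases hy : m % 10 = 0
      · simp only [hy, Nat.cast_zero, ne_eq, not_true_eq_false, false_and, if_false]
        exact ihf (m / 10) hlt
      · have hypos : (0 : Int) < ((m % 10 : Nat) : Int) := by
          exact_mod_cast Nat.pos_of_ne_zero hy
        rw [PySem.Int.mod_eq_emod_of_pos hypos]
        by_cases hnd : n % ((m % 10 : Nat) : Int) = 0
        · simp only [hnd, ne_eq, not_true_eq_false, and_false, if_false]
          exact ihf (m / 10) hlt
        · have hne : ((m % 10 : Nat) : Int) ≠ 0 := by positivity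
          rw [if_pos ⟨hne, hnd⟩, if_pos ⟨hy, hnd⟩]

theorem gcdLoop_eq (a b : Nat) : gcdLoop a b = Nat.gcd a b := by
  induction b using Nat.strong_induction_on generalizing a with
  | _ b ih =>
    by_cases hb : b = 0
    · simp [gcdLoop, hb]
    · rw [gcdLoop, if_neg hb, ih (a % b) (Nat.mod_lt _ (Nat.pos_of_ne_zero hb)) b]
      exact (Nat.gcd_comm b (a % b)).trans ((Nat.gcd_rec b a).symm.trans (Nat.gcd_comm b a))

theorem lcm_cast_dvd (a b : Nat) (n : Int) :
    ((Nat.lcm a b : Nat) : Int) ∣ n ↔ ((a : Int) ∣ n ∧ (b : Int) ∣ n) := by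
  simp [Int.natCast_dvd, Nat.lcm_dvd_iff]

theorem fair_main (m : Nat) : ∀ (l : Nat) (n : Int), 0 < l →
    (((fairBLoop m l : Nat) : Int) ∣ n ↔ ((l : Int) ∣ n ∧ fairAN n m = true)) := by
  induction m using Nat.strong_induction_on with
  | _ m ih =>
    intro l n hl
    by_cases hm : m = 0
    · simp [fairBLoop, fairAN, hm]
    · rw [fairBLoop, if_neg hm, fairAN, if_neg hm]
      by_cases hy : m % 10 = 0
      · simp only [hy, ne_eq, not_true_eq_false, false_and, if_false]
        exact ih (m / 10) (Nat.div_lt_self (Nat.pos_of_ne_zero hm) (by norm_num)) l n hl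
      · have hlt := Nat.div_lt_self (Nat.pos_of_ne_zero hm) (show 1 < 10 by norm_num)
        have hlcm : (if m % 10 ≠ 0 then l * (m % 10) / gcdLoop l (m % 10) else l)
            = Nat.lcm l (m % 10) := by
          rw [if_pos hy, gcdLoop_eq]; rfl
        rw [hlcm]
        rw [ih (m / 10) hlt (Nat.lcm l (m % 10)) n
              (Nat.lcm_pos hl (Nat.pos_of_ne_zero hy)),
            lcm_cast_dvd]
        have hmod : (n % ((m % 10 : Nat) : Int) = 0) ↔ ((m % 10 : Nat) : Int) ∣ n :=
          (Int.dvd_iff_emod_eq_zero).symm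
        by_cases hd : ((m % 10 : Nat) : Int) ∣ n
        · simp [hy, and_assoc]
        · simp [hy, and_assoc]

-- ===== VERDICT (by name: the statement is the Claim_ definition above) =====
theorem fair_spec : Claim_equal_fair := by
  intro n _ hpre
  unfold Spec_fair fair fair_alt
  have hcast : (n.toNat : Int) = n := Int.toNat_of_nonneg hpre
  have hfuel : n.toNat < n.natAbs + 1 := by omega
  have hA0 : fairALoop n n (n.natAbs + 1) = fairAN n n.toNat := by
    rw [← hcast]; exact fairALoop_eq_fairAN _ _ _ (by omega)
  rw [hA0]
  have h := fair_main n.toNat 1 n Nat.one_pos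
  rcases hA : fairAN n n.toNat with _ | _ <;>
    simp only [Int.dvd_iff_emod_eq_zero, Int.natCast_one, hA] at h <;>
    simp [h]
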